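-- pv_equiv track=rewrite | github.com/TraceofLight/BOJ_solved | 백준/Gold/17140. 이차원 배열과 연산/이차원 배열과 연산.py | dimension_down
-- ===== SOURCE A (Python) =====
-- def dimension_down(target_arr: list) -> list:
--     '''
--     2차원 리스트를 1차원 리스트로 반환하는 함수
--     '''
--
--     # 결과 리스트 선언
--     result = []
--
--     # 인덱스 길이 카운팅 변수 선언
--     idx_counter = 0
--
--     # 내부 배열의 원소들을 전부 결과 리스트에 추가
--     for each_arr in target_arr:
--         for element in each_arr:
--             result.append(element)
--
--             # 카운팅하면서 100개 이상이 된 경우 그대로 반환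
--             idx_counter += 1
--             if idx_counter == 100:
--                 return list(result)
--
--     # 결과 리스트를 반환
--     return list(result)
-- ===== SOURCE B (Python) =====
-- def dimension_down(target_arr: list) -> list:
--     '''Flatten a 2D list to 1D, keeping at most the first 100 elements.
--
--     Recursive decomposition over rows with a remaining-budget parameter:
--     each step slices the whole current row to the budget and recurses on the
--     rest with the budget reduced; no per-element counting loop.'''
--     def go(rows, remaining):
--         if not rows or remaining == 0:
--             return []
--         head = rows[0][:remaining]
--         return head + go(rows[1:], remaining - len(head))
--     return go(target_arr, 100)
-- ===== Notes on version B (the rewrite author's own statement) =====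
-- stated objective: alternative
-- what changed: Replaces A's per-element accumulator loop with idx_counter and mid-loop early return by a recursion over rows carrying a remaining budget, taking a row-level slice row[:remaining] at each step.
import Mathlib
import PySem

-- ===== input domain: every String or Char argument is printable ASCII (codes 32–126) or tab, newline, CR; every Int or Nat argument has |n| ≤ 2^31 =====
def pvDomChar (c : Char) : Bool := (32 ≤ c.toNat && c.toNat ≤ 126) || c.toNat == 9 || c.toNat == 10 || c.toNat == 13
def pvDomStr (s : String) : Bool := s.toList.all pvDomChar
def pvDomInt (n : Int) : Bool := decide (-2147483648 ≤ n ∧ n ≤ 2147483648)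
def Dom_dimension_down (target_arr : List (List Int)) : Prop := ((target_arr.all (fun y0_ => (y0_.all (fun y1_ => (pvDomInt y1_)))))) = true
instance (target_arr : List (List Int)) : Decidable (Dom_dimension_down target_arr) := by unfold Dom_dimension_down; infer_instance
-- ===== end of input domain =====

-- B replaces A's per-element counter loop by a recursion over rows with a remaining budget and row-level slices (objective: alternative).


-- ===== PORT A =====
-- inner loop of A: appends each element to result, incrementing the counter;
-- .inr = early return when the counter reaches 100, .inl = continue with the new state
def dimension_down_row : List Int → List Int → Nat → (List Int × Nat) ⊕ List Int
  | [], res, c => .inl (res, c)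
  | x :: xs, res, c =>
    let res' := res ++ [x]
    let c' := c + 1
    if c' = 100 then .inr res' else dimension_down_row xs res' c'

-- outer loop of A over the rows
def dimension_down_rows : List (List Int) → List Int → Nat → List Int
  | [], res, _ => res
  | r :: rs, res, c =>
    match dimension_down_row r res c with
    | .inl (res', c') => dimension_down_rows rs res' c'
    | .inr res' => res'

def dimension_down (target_arr : List (List Int)) : List Int :=
  dimension_down_rows target_arr [] 0

-- ===== PORT B =====
-- B's helper `go`: recursion over rows with a remaining budget;
-- rows[0][:remaining] is a nonnegative-bound slice, exactly List.take remaining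
def dimension_down_go : List (List Int) → Nat → List Int
  | [], _ => []
  | r :: rs, n =>
    if n = 0 then []
    else
      let head := r.take n
      head ++ dimension_down_go rs (n - head.length)

def dimension_down_alt (target_arr : List (List Int)) : List Int :=
  dimension_down_go target_arr 100

-- ===== PRECONDITION & SPEC =====
def Spec_dimension_down (target_arr : List (List Int)) (out : List Int) : Prop := out = dimension_down_alt target_arr
instance (target_arr : List (List Int)) (out : List Int) : Decidable (Spec_dimension_down target_arr out) := by unfold Spec_dimension_down; infer_instance

-- ===== CLAIM (what is proved, stated in full; the proofs are below) =====
def Claim_equal_dimension_down : Prop := ∀ (target_arr : List (List Int)), Dom_dimension_down target_arr → Spec_dimension_down target_arr (dimension_down target_arr)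

-- ===== LEMMAS AND PROOFS =====

theorem dimension_down_row_eq (xs : List Int) : ∀ (res : List Int), res.length < 100 →
    dimension_down_row xs res res.length =
      if 100 ≤ res.length + xs.length then Sum.inr ((res ++ xs).take 100)
      else Sum.inl (res ++ xs, res.length + xs.length) := by
  induction xs with
  | nil => intro res h; simp [dimension_down_row]; omega
  | cons x xs ih =>
    intro res h
    simp only [dimension_down_row]
    by_cases h100 : res.length + 1 = 100
    · rw [if_pos h100, if_pos (by simp; omega)]
      have htake : (res ++ x :: xs).take 100 = res ++ [x] := by
        have hsplit : res ++ x :: xs = (res ++ [x]) ++ xs := by simp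
        have hlen : (res ++ [x]).length = 100 := by simp; omega
        rw [hsplit, List.take_append_of_le_length (by omega), ← hlen, List.take_length]
      rw [htake]
    · rw [if_neg h100]
      have h1 : res.length + 1 = (res ++ [x]).length := by simp
      have h2 : (res ++ [x]).length < 100 := by simp; omega
      rw [h1, ih _ h2]
      have e1 : (res ++ [x]).length + xs.length = res.length + (x :: xs).length := by
        simp; omega
      have e2 : res ++ [x] ++ xs = res ++ x :: xs := by simp
      rw [e2, e1]

theorem dimension_down_rows_eq (tss : List (List Int)) : ∀ (res : List Int), res.length < 100 →
    dimension_down_rows tss res res.length = (res ++ tss.flatMap id).take 100 := by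
  induction tss with
  | nil =>
    intro res h
    simp only [dimension_down_rows, List.flatMap_nil, List.append_nil]
    rw [List.take_of_length_le (by omega)]
  | cons r rs ih =>
    intro res h
    simp only [dimension_down_rows]
    rw [dimension_down_row_eq r res h]
    by_cases hc : 100 ≤ res.length + r.length
    · rw [if_pos hc]
      have hRHS : (res ++ (r :: rs).flatMap id).take 100 = (res ++ r).take 100 := by
        rw [show res ++ (r :: rs).flatMap id = (res ++ r) ++ rs.flatMap id by simp,
            List.take_append_of_le_length (by simp; omega)]
      rw [hRHS]
    · rw [if_neg hc]
      have h1 : res.length + r.length = (res ++ r).length := by simp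
      have h2 : (res ++ r).length < 100 := by simp; omega
      rw [h1]
      show dimension_down_rows rs (res ++ r) (res ++ r).length = _
      rw [ih _ h2]
      simp

theorem dimension_down_go_eq (tss : List (List Int)) : ∀ (n : Nat),
    dimension_down_go tss n = (tss.flatMap id).take n := by
  induction tss with
  | nil => intro n; simp [dimension_down_go]
  | cons r rs ih =>
    intro n
    simp only [dimension_down_go]
    by_cases h0 : n = 0
    · simp [h0]
    · rw [if_neg h0, ih]
      have : (r :: rs).flatMap id = r ++ rs.flatMap id := by simp
      rw [this, List.take_append]
      by_cases hle : r.length ≤ n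
      · have h1 : n - (r.take n).length = n - r.length := by rw [List.length_take]; omega
        rw [h1]
      · have h1 : (r.take n).length = n := by rw [List.length_take]; omega
        have h2 : n - r.length = 0 := by omega
        rw [h1, h2]
        simp

-- ===== VERDICT (by name: the statement is the Claim_ definition above) =====
theorem dimension_down_spec : Claim_equal_dimension_down := by
  intro t _
  show dimension_down t = dimension_down_alt t
  unfold dimension_down dimension_down_alt
  rw [dimension_down_go_eq]
  simpa using dimension_down_rows_eq t [] (by simp)
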